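-- pv_equiv track=rewrite | github.com/GB127/ygo_flist | cards.py | split_pool
-- ===== SOURCE A (Python) =====
-- def split_pool(pool):
--     extras = []
--     monsters = []
--     spells = []
--     traps = []
--     for card in pool:
--         if card["type"] == "Spell Card":
--             spells.append(card)
--         elif card["type"] in ["Fusion Monster", "Synchro Monster", "Synchro Tuner Monster"]:
--             extras.append(card)
--         elif card["type"] in ["Union Effect Monster",
--                                 "Spirit Monster",
--                                 "Normal Tuner Monster",
--                                 "Tuner Monster",
--                                 "Gemini Monster",
--                                 "Effect Monster",
--                                 "Normal Monster",
--                                 "Flip Effect Monster",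
--                                 "Ritual Monster",
--                                 "Toon Monster",
--                                 "Ritual Effect Monster"]:
--             monsters.append(card)
--         elif card["type"] == "Trap Card":
--             traps.append(card)
--         elif card["type"] == "Token":
--             pass
--     return monsters, spells, traps, extras
-- ===== SOURCE B (Python) =====
-- MONSTER_TYPES = frozenset([
--     "Union Effect Monster", "Spirit Monster", "Normal Tuner Monster",
--     "Tuner Monster", "Gemini Monster", "Effect Monster", "Normal Monster",
--     "Flip Effect Monster", "Ritual Monster", "Toon Monster",
--     "Ritual Effect Monster",
-- ])
-- EXTRA_TYPES = frozenset(["Fusion Monster", "Synchro Monster", "Synchro Tuner Monster"])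
--
--
-- def split_pool(pool):
--     # Four staged filter passes, one per bucket. Correct because the four
--     # categories are disjoint and filtering preserves the pool order, which is
--     # exactly the per-bucket order A's single accumulating pass produces.
--     monsters = [c for c in pool if c["type"] in MONSTER_TYPES]
--     spells = [c for c in pool if c["type"] == "Spell Card"]
--     traps = [c for c in pool if c["type"] == "Trap Card"]
--     extras = [c for c in pool if c["type"] in EXTRA_TYPES]
--     return monsters, spells, traps, extras
-- ===== Notes on version B (the rewrite author's own statement) =====
-- stated objective: simpler
-- what changed: Replaces A's single pass with four mutable accumulators and an if/elif chain by four independent declarative filter passes, one comprehension per bucket over the whole pool.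
import Mathlib
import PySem

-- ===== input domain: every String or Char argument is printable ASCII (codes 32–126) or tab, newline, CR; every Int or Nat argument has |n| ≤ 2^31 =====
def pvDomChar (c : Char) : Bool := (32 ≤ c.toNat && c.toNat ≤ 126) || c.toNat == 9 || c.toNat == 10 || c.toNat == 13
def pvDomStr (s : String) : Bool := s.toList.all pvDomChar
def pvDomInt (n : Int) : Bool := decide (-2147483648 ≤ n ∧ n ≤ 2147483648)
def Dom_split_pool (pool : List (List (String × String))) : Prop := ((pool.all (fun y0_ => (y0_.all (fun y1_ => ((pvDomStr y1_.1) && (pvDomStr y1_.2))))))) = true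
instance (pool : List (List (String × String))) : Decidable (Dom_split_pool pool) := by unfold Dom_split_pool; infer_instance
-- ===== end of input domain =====

-- B replaces A's single accumulating pass and if/elif chain by four independent filter passes (simpler).
-- Neither Python mutates its argument; card["type"] raises KeyError in both when the key is absent (excluded by Pre_).

-- ===== PORT A =====
-- state in A's declaration order: (extras, monsters, spells, traps); card["type"] = first match in the assoc list
def splitStateA := (List (List (String × String))) × (List (List (String × String))) × (List (List (String × String))) × (List (List (String × String)))

def cardType (card : List (String × String)) : String :=
  ((PySem.Dict.mk card).get? "type").getD ""   -- total form of card["type"]; Pre_ guarantees the key is present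

def stepA (st : splitStateA) (card : List (String × String)) : splitStateA :=
  let ty := cardType card
  if ty == "Spell Card" then (st.1, st.2.1, st.2.2.1 ++ [card], st.2.2.2)
  else if (["Fusion Monster", "Synchro Monster", "Synchro Tuner Monster"]).contains ty then
    (st.1 ++ [card], st.2.1, st.2.2.1, st.2.2.2)
  else if (["Union Effect Monster", "Spirit Monster", "Normal Tuner Monster", "Tuner Monster",
            "Gemini Monster", "Effect Monster", "Normal Monster", "Flip Effect Monster",
            "Ritual Monster", "Toon Monster", "Ritual Effect Monster"]).contains ty then
    (st.1, st.2.1 ++ [card], st.2.2.1, st.2.2.2)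
  else if ty == "Trap Card" then (st.1, st.2.1, st.2.2.1, st.2.2.2 ++ [card])
  else st

def split_pool (pool : List (List (String × String))) : (List (List (String × String))) × (List (List (String × String))) × (List (List (String × String))) × (List (List (String × String))) :=
  let st := pool.foldl stepA ([], [], [], [])
  (st.2.1, st.2.2.1, st.2.2.2, st.1)

-- ===== PORT B =====
-- B's constant type sets (Python frozensets → PySem.Set)
def monsterTypes : PySem.Set String :=
  PySem.Set.ofList ["Union Effect Monster", "Spirit Monster", "Normal Tuner Monster", "Tuner Monster",
    "Gemini Monster", "Effect Monster", "Normal Monster", "Flip Effect Monster",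
    "Ritual Monster", "Toon Monster", "Ritual Effect Monster"]
def extraTypes : PySem.Set String :=
  PySem.Set.ofList ["Fusion Monster", "Synchro Monster", "Synchro Tuner Monster"]

-- four staged filter passes, one per bucket (B's comprehensions)
def split_pool_alt (pool : List (List (String × String))) : (List (List (String × String))) × (List (List (String × String))) × (List (List (String × String))) × (List (List (String × String))) :=
  (pool.filter (fun c => monsterTypes.contains (cardType c)),
   pool.filter (fun c => cardType c == "Spell Card"),
   pool.filter (fun c => cardType c == "Trap Card"),
   pool.filter (fun c => extraTypes.contains (cardType c)))

-- ===== PRECONDITION & SPEC =====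
-- Pre_ excludes pools with a card lacking the "type" key, on which both Pythons raise KeyError.
def Pre_split_pool (pool : List (List (String × String))) : Prop :=
  (pool.all (fun card => (PySem.Dict.mk card).contains "type")) = true
instance (pool : List (List (String × String))) : Decidable (Pre_split_pool pool) := by unfold Pre_split_pool; infer_instance

def pvWitness_split_pool : (List (List (String × String))) :=
  [[("type", "Spell Card")], [("type", "Effect Monster"), ("id", "7")], [("type", "Token")], [("type", "Trap Card")]]

def Spec_split_pool (pool : List (List (String × String))) (out : (List (List (String × String))) × (List (List (String × String))) × (List (List (String × String))) × (List (List (String × String)))) : Prop := out = split_pool_alt pool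
instance (pool : List (List (String × String))) (out : (List (List (String × String))) × (List (List (String × String))) × (List (List (String × String))) × (List (List (String × String)))) : Decidable (Spec_split_pool pool out) := by unfold Spec_split_pool; infer_instance

-- ===== CLAIM (what is proved, stated in full; the proofs are below) =====
def Claim_equal_split_pool : Prop := ∀ (pool : List (List (String × String))), Dom_split_pool pool → Pre_split_pool pool → Spec_split_pool pool (split_pool pool)

-- ===== LEMMAS AND PROOFS =====

-- per-card form of A's step: each bucket grows by exactly its filter contribution
theorem stepA_eq (st : splitStateA) (card : List (String × String)) :
    stepA st card =
      (st.1 ++ (if extraTypes.contains (cardType card) then [card] else []),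
       st.2.1 ++ (if monsterTypes.contains (cardType card) then [card] else []),
       st.2.2.1 ++ (if cardType card == "Spell Card" then [card] else []),
       st.2.2.2 ++ (if cardType card == "Trap Card" then [card] else [])) := by
  obtain ⟨e, m, s, t⟩ := st
  simp only [stepA]
  generalize cardType card = ty
  by_cases h0 : ty = "Spell Card"
  · subst h0; simp [monsterTypes, extraTypes, PySem.Set.contains, PySem.Set.ofList, PySem.Set.add]
  by_cases h1 : ty = "Fusion Monster"
  · subst h1; simp [monsterTypes, extraTypes, PySem.Set.contains, PySem.Set.ofList, PySem.Set.add]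
  by_cases h2 : ty = "Synchro Monster"
  · subst h2; simp [monsterTypes, extraTypes, PySem.Set.contains, PySem.Set.ofList, PySem.Set.add]
  by_cases h3 : ty = "Synchro Tuner Monster"
  · subst h3; simp [monsterTypes, extraTypes, PySem.Set.contains, PySem.Set.ofList, PySem.Set.add]
  by_cases h4 : ty = "Union Effect Monster"
  · subst h4; simp [monsterTypes, extraTypes, PySem.Set.contains, PySem.Set.ofList, PySem.Set.add]
  by_cases h5 : ty = "Spirit Monster"
  · subst h5; simp [monsterTypes, extraTypes, PySem.Set.contains, PySem.Set.ofList, PySem.Set.add]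
  by_cases h6 : ty = "Normal Tuner Monster"
  · subst h6; simp [monsterTypes, extraTypes, PySem.Set.contains, PySem.Set.ofList, PySem.Set.add]
  by_cases h7 : ty = "Tuner Monster"
  · subst h7; simp [monsterTypes, extraTypes, PySem.Set.contains, PySem.Set.ofList, PySem.Set.add]
  by_cases h8 : ty = "Gemini Monster"
  · subst h8; simp [monsterTypes, extraTypes, PySem.Set.contains, PySem.Set.ofList, PySem.Set.add]
  by_cases h9 : ty = "Effect Monster"
  · subst h9; simp [monsterTypes, extraTypes, PySem.Set.contains, PySem.Set.ofList, PySem.Set.add]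
  by_cases h10 : ty = "Normal Monster"
  · subst h10; simp [monsterTypes, extraTypes, PySem.Set.contains, PySem.Set.ofList, PySem.Set.add]
  by_cases h11 : ty = "Flip Effect Monster"
  · subst h11; simp [monsterTypes, extraTypes, PySem.Set.contains, PySem.Set.ofList, PySem.Set.add]
  by_cases h12 : ty = "Ritual Monster"
  · subst h12; simp [monsterTypes, extraTypes, PySem.Set.contains, PySem.Set.ofList, PySem.Set.add]
  by_cases h13 : ty = "Toon Monster"
  · subst h13; simp [monsterTypes, extraTypes, PySem.Set.contains, PySem.Set.ofList, PySem.Set.add]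
  by_cases h14 : ty = "Ritual Effect Monster"
  · subst h14; simp [monsterTypes, extraTypes, PySem.Set.contains, PySem.Set.ofList, PySem.Set.add]
  by_cases h15 : ty = "Trap Card"
  · subst h15; simp [monsterTypes, extraTypes, PySem.Set.contains, PySem.Set.ofList, PySem.Set.add]
  simp [monsterTypes, extraTypes, PySem.Set.contains, PySem.Set.ofList,
    h0, h1, h2, h3, h4, h5, h6, h7, h8, h9, h10, h11, h12, h13, h14, h15]

-- the fold of A's step equals the four filters, prefixed by the starting buckets
theorem foldl_stepA (pool : List (List (String × String))) (e m s t : List (List (String × String))) :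
    pool.foldl stepA (e, m, s, t) =
      (e ++ pool.filter (fun c => extraTypes.contains (cardType c)),
       m ++ pool.filter (fun c => monsterTypes.contains (cardType c)),
       s ++ pool.filter (fun c => cardType c == "Spell Card"),
       t ++ pool.filter (fun c => cardType c == "Trap Card")) := by
  induction pool generalizing e m s t with
  | nil => simp
  | cons c cs ih =>
    simp only [List.foldl_cons, stepA_eq, ih, List.filter_cons]
    split_ifs <;> simp

-- ===== VERDICT (by name: the statement is the Claim_ definition above) =====
theorem split_pool_spec : Claim_equal_split_pool := by
  intro pool _ _
  unfold Spec_split_pool split_pool split_pool_alt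
  rw [foldl_stepA]
  simp
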